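-- pv_equiv track=rewrite | github.com/DrowAnn/RetosDeProgramacion | Logica de Programacion/Ejercicios 1 -10/2-Anagrama.py | anagrama
-- ===== SOURCE A (Python) =====
-- def anagrama(a, b):
--     comparador = b
--     if len(a) != len(b):
--         return False
--     elif a == b:
--         return False
--     for i in a:
--         contador = 0
--         temporal = ""
--         for j in comparador:
--             if i == j:
--                 if contador == 0:
--                     contador = contador + 1
--                 else:
--                     temporal = temporal + j
--             else:
--                 temporal = temporal + j
--         comparador = temporal
--     if comparador == "":
--         return True
--     else:
--         return False
-- ===== SOURCE B (Python) =====
-- def anagrama(a, b):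
--     return a != b and sorted(a) == sorted(b)
-- ===== Notes on version B (the rewrite author's own statement) =====
-- stated objective: simpler
-- what changed: Replaces A's loop that repeatedly rebuilds the remaining string by removing first occurrences with a single sort-and-compare (a != b and sorted(a) == sorted(b))
import Mathlib
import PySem

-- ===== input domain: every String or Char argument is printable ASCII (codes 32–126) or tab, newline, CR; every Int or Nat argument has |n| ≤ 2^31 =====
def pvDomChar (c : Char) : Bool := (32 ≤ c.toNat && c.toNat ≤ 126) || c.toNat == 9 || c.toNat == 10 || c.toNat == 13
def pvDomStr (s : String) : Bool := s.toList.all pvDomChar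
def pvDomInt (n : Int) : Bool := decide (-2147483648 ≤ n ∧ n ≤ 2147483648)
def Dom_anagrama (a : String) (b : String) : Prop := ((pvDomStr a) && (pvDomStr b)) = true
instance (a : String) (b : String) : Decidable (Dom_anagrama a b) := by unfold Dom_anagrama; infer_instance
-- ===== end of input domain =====

-- ===== PORT A =====
-- B replaces A's quadratic remove-first-occurrence loop with sort-and-compare: simpler and structurally different (speed not claimed).
def anagrama (a : String) (b : String) : Bool :=
  -- comparador = b; for i in a: rebuild comparador dropping the first occurrence of i
  if a.toList.length ≠ b.toList.length then false
  else if a = b then false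
  else
    let comparador :=
      a.toList.foldl (fun comparador i =>
        (comparador.foldl (fun (st : Nat × List Char) j =>
          if i == j then
            if st.1 == 0 then (st.1 + 1, st.2) else (st.1, st.2 ++ [j])
          else (st.1, st.2 ++ [j])) (0, ([] : List Char))).2) b.toList
    if comparador = [] then true else false

-- ===== PORT B =====
def anagrama_alt (a : String) (b : String) : Bool :=
  decide (a ≠ b) &&
    decide (PySem.List.sorted a.toList (fun x => x) false
          = PySem.List.sorted b.toList (fun x => x) false)

-- ===== PRECONDITION & SPEC =====
def Spec_anagrama (a : String) (b : String) (out : Bool) : Prop := out = anagrama_alt a b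
instance (a : String) (b : String) (out : Bool) : Decidable (Spec_anagrama a b out) := by unfold Spec_anagrama; infer_instance

-- ===== CLAIM (what is proved, stated in full; the proofs are below) =====
def Claim_equal_anagrama : Prop := ∀ (a : String) (b : String), Dom_anagrama a b → Spec_anagrama a b (anagrama a b)

-- ===== LEMMAS AND PROOFS =====

-- A's inner loop, once the first occurrence of i has been seen (contador ≠ 0), copies the rest unchanged
theorem pv_inner_after (i : Char) (l : List Char) : ∀ (c : Nat) (acc : List Char), c ≠ 0 →
    (l.foldl (fun (st : Nat × List Char) j =>
      if i == j then
        if st.1 == 0 then (st.1 + 1, st.2) else (st.1, st.2 ++ [j])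
      else (st.1, st.2 ++ [j])) (c, acc)).2 = acc ++ l := by
  induction l with
  | nil => intro c acc _; simp
  | cons j t ih =>
    intro c acc hc
    have hc' : (c == 0) = false := by simpa using hc
    by_cases h : i = j
    · subst h
      simp only [List.foldl, beq_self_eq_true, if_true, hc', Bool.false_eq_true, if_false]
      rw [ih c (acc ++ [i]) hc]; simp
    · have hbeq : (i == j) = false := by simpa using h
      simp only [List.foldl, hbeq, Bool.false_eq_true, if_false]
      rw [ih c (acc ++ [j]) hc]; simp

-- A's inner loop over comparador is List.erase of i
theorem pv_inner_erase (i : Char) (l : List Char) : ∀ (acc : List Char),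
    (l.foldl (fun (st : Nat × List Char) j =>
      if i == j then
        if st.1 == 0 then (st.1 + 1, st.2) else (st.1, st.2 ++ [j])
      else (st.1, st.2 ++ [j])) (0, acc)).2 = acc ++ l.erase i := by
  induction l with
  | nil => intro acc; simp
  | cons j t ih =>
    intro acc
    by_cases h : i = j
    · subst h
      simp only [List.foldl, beq_self_eq_true, if_true]
      rw [pv_inner_after i t 1 acc (by decide)]
      simp [List.erase_cons_head]
    · have hbeq : (i == j) = false := by simpa using h
      have hbeq' : (j == i) = false := by simpa using (Ne.symm h)
      simp only [List.foldl, hbeq, if_false, Bool.false_eq_true]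
      rw [ih (acc ++ [j])]
      simp [List.erase_cons_tail, hbeq']

-- A's outer loop is List.diff
theorem pv_outer_diff (xs : List Char) : ∀ (l : List Char),
    xs.foldl (fun comparador i =>
      (comparador.foldl (fun (st : Nat × List Char) j =>
        if i == j then
          if st.1 == 0 then (st.1 + 1, st.2) else (st.1, st.2 ++ [j])
        else (st.1, st.2 ++ [j])) (0, ([] : List Char))).2) l = l.diff xs := by
  induction xs with
  | nil => intro l; simp
  | cons i t ih =>
    intro l
    simp only [List.foldl, List.diff_cons]
    rw [pv_inner_erase i l [], List.nil_append, ih]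

theorem pv_diff_nil_iff_perm (xs ys : List Char) (hlen : xs.length = ys.length) :
    ys.diff xs = [] ↔ xs.Perm ys := by
  constructor
  · intro h
    have : (ys : Multiset Char) - (xs : Multiset Char) = 0 := by
      rw [Multiset.coe_sub, h]; rfl
    have hle : (ys : Multiset Char) ≤ (xs : Multiset Char) := tsub_eq_zero_iff_le.mp this
    have heq : (ys : Multiset Char) = (xs : Multiset Char) :=
      Multiset.eq_of_le_of_card_le hle (by simpa using hlen.le)
    exact (Multiset.coe_eq_coe.mp heq).symm
  · intro h
    have : (ys : Multiset Char) = (xs : Multiset Char) := Multiset.coe_eq_coe.mpr h.symm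
    have : (ys : Multiset Char) - (xs : Multiset Char) = 0 := by rw [this]; simp
    rw [Multiset.coe_sub] at this
    exact (Multiset.coe_eq_zero _).mp this

-- ===== VERDICT (by name: the statement is the Claim_ definition above) =====
theorem anagrama_spec : Claim_equal_anagrama := by
  intro a b _
  unfold Spec_anagrama anagrama anagrama_alt
  have hsort := PySem.List.sorted_id_eq_sorted_id_iff_perm (xs := a.toList) (ys := b.toList)
  by_cases hab : a = b
  · simp [hab]
  · by_cases hlen : a.toList.length = b.toList.length
    · rw [if_neg (by simp [hlen]), if_neg hab, pv_outer_diff a.toList b.toList]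
      have hperm := pv_diff_nil_iff_perm a.toList b.toList hlen
      by_cases hd : b.toList.diff a.toList = []
      · rw [if_pos hd]
        simp [hab, hsort.mpr (hperm.mp hd)]
      · rw [if_neg hd]
        have h2 : ¬ (PySem.List.sorted a.toList (fun x => x) false
                   = PySem.List.sorted b.toList (fun x => x) false) :=
          fun h => hd (hperm.mpr (hsort.mp h))
        simp [h2]
    · rw [if_pos (by simpa using hlen)]
      have h2 : ¬ (PySem.List.sorted a.toList (fun x => x) false
                 = PySem.List.sorted b.toList (fun x => x) false) :=
        fun h => hlen (hsort.mp h).length_eq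
      simp [h2]
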